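-- pv_equiv track=rewrite | github.com/Zoya-74/Projects | Year 1 Practice/lab7.py | largest_at_position
-- ===== SOURCE A (Python) =====
-- def longest_chain(lst: list[int]) -> int:
--     """
--     Your longest_chain function from last week, make sure this works properly
--     before proceeding with the rest of the lab!
--
--     >>> longest_chain([1, 1, 0])
--     2
--     >>> longest_chain([0, 1, 1])
--     0
--     >>> longest_chain([1, 0, 1, 1])
--     1
--     >>> longest_chain([1, 1, 1, 1, 1, 1, 1, 1, 1])
--     9
--     >>> longest_chain([1, 0, 0, 1, 1])
--     1
--     """
--     length = 0
--     stop = False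
--     i = 0
--     while i < len(lst):
--         if not stop:
--             if lst[i] == 1:
--                 length += 1
--             else:
--                 stop = True
--         i += 1
--     return length
--
-- def largest_at_position(matrix: list[list[int]], row: int, col: int) -> int:
--     """
--     Returns the area of the largest rectangle whose top left corner is at
--     position <row>, <col> in <matrix>.
--
--     You MUST make use of the helper <longest_chain> here as you loop through
--     each row of the matrix. Do not modify (i.e., mutate) the input matrix.
--
--     >>> case1 = [[1, 0, 1, 0, 0],
--     ...          [1, 0, 1, 1, 1],
--     ...          [1, 1, 1, 1, 1],
--     ...          [1, 0, 0, 1, 0]]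
--     >>> largest_at_position(case1, 0, 0)
--     4
--     >>> largest_at_position(case1, 2, 0)
--     5
--     >>> largest_at_position(case1, 1, 2)
--     6
--     >>> largest_at_position(case1, 1, 1)
--     0
--     >>> largest_at_position(case1, 1, 3)
--     4
--     >>> case2 = [[1, 1, 1, 1, 1],
--     ...          [1, 1, 1, 1, 1],
--     ...          [1, 1, 1, 0, 0],
--     ...          [1, 1, 0, 0, 0],
--     ...          [1, 1, 1, 1, 0]]
--     >>> largest_at_position(case2, 0, 0)
--     10
--     >>> largest_at_position(case2, 1, 1)
--     4
--     >>> case3 = [[0]]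
--     >>> largest_at_position(case3, 0, 0)
--     0
--     """
--     max_area = 0
--     lowest_chain = longest_chain(matrix[row][col:])
--     line = 1
--     while row < len(matrix):
--         current_chain = longest_chain(matrix[row][col:])
--         lowest_chain = min(lowest_chain, current_chain)
--         max_area = max(max_area, lowest_chain * line)
--         row += 1
--         line += 1
--     return max_area
-- ===== SOURCE B (Python) =====
-- def largest_at_position(matrix: list[list[int]], row: int, col: int) -> int:
--     # Width/height dual: widths per row, then maximize w * (number of leading rows with width >= w).
--     widths = []
--     for r in range(row, len(matrix)):
--         run = 0
--         for x in matrix[r][col:]: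
--             if x == 1:
--                 run += 1
--             else:
--                 break
--         widths.append(run)
--     max_area = 0
--     w = 1
--     while True:
--         height = 0
--         for wd in widths:
--             if wd >= w:
--                 height += 1
--             else:
--                 break
--         if height == 0:
--             break
--         max_area = max(max_area, w * height)
--         w += 1
--     return max_area
-- ===== Notes on version B (the rewrite author's own statement) =====
-- stated objective: alternative
-- what changed: A keeps a running minimum of row widths and maximizes min*height while scanning rows; B first builds the list of per-row widths and then enumerates candidate widths w=1,2,..., taking max of w times the number of leading rows with width >= w (the width/height dual).
import Mathlib
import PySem

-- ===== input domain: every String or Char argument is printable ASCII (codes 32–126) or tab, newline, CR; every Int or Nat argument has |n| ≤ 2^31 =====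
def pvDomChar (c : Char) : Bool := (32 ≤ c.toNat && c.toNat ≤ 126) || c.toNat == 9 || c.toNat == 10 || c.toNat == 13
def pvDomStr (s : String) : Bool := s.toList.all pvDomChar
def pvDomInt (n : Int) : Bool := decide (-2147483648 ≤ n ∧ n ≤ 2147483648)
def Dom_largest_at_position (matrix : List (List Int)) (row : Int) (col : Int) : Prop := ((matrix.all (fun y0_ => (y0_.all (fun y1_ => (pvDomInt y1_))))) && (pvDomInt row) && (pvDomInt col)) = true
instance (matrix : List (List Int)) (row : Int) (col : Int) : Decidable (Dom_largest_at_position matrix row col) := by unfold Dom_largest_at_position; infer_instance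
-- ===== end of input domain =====

-- B replaces A's running-minimum-over-heights loop with its width/height dual (widths list
-- first, then maximize w * number-of-leading-rows-with-width ≥ w); same cost, different algorithm.

-- ===== PORT A =====
-- the helper longest_chain, transliterated (fold carries (length, stop))
def longest_chain (lst : List Int) : Int :=
  (lst.foldl
    (fun (s : Int × Bool) x =>
      if s.2 = false then (if x = 1 then (s.1 + 1, s.2) else (s.1, true)) else s)
    ((0 : Int), false)).1

-- matrix[r][col:] fed to longest_chain; none branch (IndexError in Python) is outside Pre_
def aWidth (matrix : List (List Int)) (col : Int) (r : Int) : Int :=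
  match PySem.List.pyGet? matrix r with
  | some rw => longest_chain (PySem.List.slice rw (some col) none)
  | none => 0

-- A's while loop; fuel = number of iterations (len(matrix) - row)
def aLoop (matrix : List (List Int)) (col : Int) : Nat → Int → Int → Int → Int → Int
  | 0, _row, _lowest, _line, maxA => maxA
  | n+1, row, lowest, line, maxA =>
    let lowest' := min lowest (aWidth matrix col row)
    aLoop matrix col n (row + 1) lowest' (line + 1) (max maxA (lowest' * line))

def largest_at_position (matrix : List (List Int)) (row : Int) (col : Int) : Int :=
  match PySem.List.pyGet? matrix row with
  | none => 0   -- Python raises IndexError here (outside Pre_)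
  | some r0 =>
    aLoop matrix col ((matrix.length : Int) - row).toNat row
      (longest_chain (PySem.List.slice r0 (some col) none)) 1 0

-- ===== PORT B =====
-- run of leading 1s (the inner for/break loop of Source B)
def leadRun : List Int → Int
  | [] => 0
  | x :: xs => if x = 1 then leadRun xs + 1 else 0

def bWidth (matrix : List (List Int)) (col : Int) (r : Int) : Int :=
  match PySem.List.pyGet? matrix r with
  | some rw => leadRun (PySem.List.slice rw (some col) none)
  | none => 0

-- number of leading widths ≥ w (the for/break loop over widths)
def leadCount (w : Int) : List Int → Int
  | [] => 0
  | x :: xs => if w ≤ x then leadCount w xs + 1 else 0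

-- Source B's 'while True' loop; the fuel only bounds the (provably reached) break
def bLoop (ws : List Int) : Nat → Int → Int → Int
  | 0, _w, maxA => maxA
  | n+1, w, maxA =>
    let h := leadCount w ws
    if h = 0 then maxA else bLoop ws n (w + 1) (max maxA (w * h))

def largest_at_position_alt (matrix : List (List Int)) (row : Int) (col : Int) : Int :=
  let ws := (PySem.List.pyRange row (matrix.length : Int) 1).map (bWidth matrix col)
  bLoop ws ((match ws with | [] => 0 | x :: _ => x.toNat) + 1) 1 0

-- ===== PRECONDITION & SPEC =====
-- Pre_ is exactly where Python A returns: matrix[row] must not raise IndexError.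
def Pre_largest_at_position (matrix : List (List Int)) (row : Int) (_col : Int) : Prop :=
  -(matrix.length : Int) ≤ row ∧ row < (matrix.length : Int)
instance (matrix : List (List Int)) (row : Int) (col : Int) : Decidable (Pre_largest_at_position matrix row col) := by unfold Pre_largest_at_position; infer_instance

def pvWitness_largest_at_position : List (List Int) × Int × Int := ([[1, 1], [1, 0]], 0, 0)

def Spec_largest_at_position (matrix : List (List Int)) (row : Int) (col : Int) (out : Int) : Prop := out = largest_at_position_alt matrix row col
instance (matrix : List (List Int)) (row : Int) (col : Int) (out : Int) : Decidable (Spec_largest_at_position matrix row col out) := by unfold Spec_largest_at_position; infer_instance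

-- ===== CLAIM (what is proved, stated in full; the proofs are below) =====
def Claim_equal_largest_at_position : Prop := ∀ (matrix : List (List Int)) (row : Int) (col : Int), Dom_largest_at_position matrix row col → Pre_largest_at_position matrix row col → Spec_largest_at_position matrix row col (largest_at_position matrix row col)

-- ===== LEMMAS AND PROOFS =====

-- longest_chain computes the leading run of 1s
theorem longest_chain_aux (lst : List Int) (len : Int) :
    (lst.foldl
      (fun (s : Int × Bool) x =>
        if s.2 = false then (if x = 1 then (s.1 + 1, s.2) else (s.1, true)) else s)
      (len, false)).1 = len + leadRun lst ∧
    (lst.foldl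
      (fun (s : Int × Bool) x =>
        if s.2 = false then (if x = 1 then (s.1 + 1, s.2) else (s.1, true)) else s)
      (len, true)).1 = len := by
  induction lst generalizing len with
  | nil => simp [leadRun]
  | cons x xs ih =>
    constructor
    · by_cases hx : x = 1
      · simpa [hx, leadRun] using by
          have := (ih (len + 1)).1; omega
      · simp [hx, leadRun, (ih len).2]
    · simp [(ih len).2]

theorem longest_chain_eq (lst : List Int) : longest_chain lst = leadRun lst := by
  have := (longest_chain_aux lst 0).1
  simpa [longest_chain] using this

theorem aWidth_eq (matrix : List (List Int)) (col r : Int) :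
    aWidth matrix col r = bWidth matrix col r := by
  unfold aWidth bWidth
  cases PySem.List.pyGet? matrix r with
  | none => rfl
  | some rw => simp [longest_chain_eq]

-- the widths list, row by row (n rows starting at r)
def wlist (matrix : List (List Int)) (col : Int) : Int → Nat → List Int
  | _, 0 => []
  | r, n+1 => bWidth matrix col r :: wlist matrix col (r + 1) n

-- A's loop re-expressed over the widths list
def aRun : List Int → Int → Int → Int → Int
  | [], _low, _line, maxA => maxA
  | x :: xs, low, line, maxA =>
    aRun xs (min low x) (line + 1) (max maxA (min low x * line))

theorem aLoop_eq_aRun (matrix : List (List Int)) (col : Int) :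
    ∀ (n : Nat) (r low line maxA : Int),
      aLoop matrix col n r low line maxA = aRun (wlist matrix col r n) low line maxA := by
  intro n
  induction n with
  | zero => intro r low line maxA; rfl
  | succ m ih =>
    intro r low line maxA
    simp only [aLoop, wlist, aRun, aWidth_eq]
    exact ih (r + 1) (min low (bWidth matrix col r)) (line + 1)
      (max maxA (min low (bWidth matrix col r) * line))

theorem map_pyRange_eq_wlist (matrix : List (List Int)) (col : Int) :
    ∀ (n : Nat) (r : Int),
      (PySem.List.pyRange r (r + (n : Int)) 1).map (bWidth matrix col)
        = wlist matrix col r n := by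
  intro n
  induction n with
  | zero => intro r; simp [PySem.List.pyRange_one_eq_nil, wlist]
  | succ m ih =>
    intro r
    rw [PySem.List.pyRange_one_cons (by push_cast; omega)]
    simp only [List.map_cons, wlist]
    have : r + ((m : Int) + 1) = (r + 1) + (m : Int) := by ring
    rw [show r + ((Nat.succ m : Nat) : Int) = (r + 1) + (m : Int) by push_cast; ring]
    rw [ih (r + 1)]

-- ----- the width/height duality -----

-- terms produced by A's loop
def termsA : List Int → Int → Int → List Int
  | [], _low, _line => []
  | x :: xs, low, line => (min low x * line) :: termsA xs (min low x) (line + 1)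

theorem aRun_eq_foldl : ∀ (ws : List Int) (low line maxA : Int),
    aRun ws low line maxA = (termsA ws low line).foldl max maxA := by
  intro ws
  induction ws with
  | nil => intro low line maxA; rfl
  | cons x xs ih => intro low line maxA; simp only [aRun, termsA, List.foldl]; apply ih

-- terms produced by B's loop
def termsB (ws : List Int) : Nat → Int → List Int
  | 0, _w => []
  | n+1, w =>
    if leadCount w ws = 0 then [] else (w * leadCount w ws) :: termsB ws n (w + 1)

theorem bLoop_eq_foldl (ws : List Int) : ∀ (fuel : Nat) (w maxA : Int),
    bLoop ws fuel w maxA = (termsB ws fuel w).foldl max maxA := by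
  intro fuel
  induction fuel with
  | zero => intro w maxA; rfl
  | succ n ih =>
    intro w maxA
    simp only [bLoop, termsB]
    by_cases h : leadCount w ws = 0
    · simp [h]
    · rw [if_neg h, if_neg h]
      simp only [List.foldl]
      apply ih

-- foldl max basics
theorem foldl_max_init (l : List Int) (a : Int) : a ≤ l.foldl max a := by
  induction l generalizing a with
  | nil => exact le_refl a
  | cons x xs ih => exact le_trans (le_max_left a x) (ih (max a x))

theorem foldl_max_mem (l : List Int) (a x : Int) (hx : x ∈ l) : x ≤ l.foldl max a := by
  induction l generalizing a with
  | nil => cases hx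
  | cons y ys ih =>
    rcases List.mem_cons.1 hx with h | h
    · subst h; exact le_trans (le_max_right a x) (foldl_max_init ys _)
    · exact ih (max a y) h

theorem foldl_max_le (l : List Int) (a c : Int) (ha : a ≤ c) (h : ∀ x ∈ l, x ≤ c) :
    l.foldl max a ≤ c := by
  induction l generalizing a with
  | nil => exact ha
  | cons y ys ih =>
    exact ih (max a y) (max_le ha (h y (List.mem_cons_self)))
      (fun x hx => h x (List.mem_cons_of_mem y hx))

-- prefix minimum: min of low and the first k elements
def pM : Int → List Int → Nat → Int
  | low, _, 0 => low
  | low, [], _+1 => low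
  | low, x :: xs, k+1 => pM (min low x) xs k

theorem pM_le_low : ∀ (ws : List Int) (k : Nat) (low : Int), pM low ws k ≤ low := by
  intro ws
  induction ws with
  | nil => intro k low; cases k <;> simp [pM]
  | cons x xs ih =>
    intro k low
    cases k with
    | zero => simp [pM]
    | succ j => exact le_trans (ih j (min low x)) (min_le_left _ _)

theorem leadCount_nonneg (w : Int) : ∀ ws : List Int, 0 ≤ leadCount w ws := by
  intro ws
  induction ws with
  | nil => simp [leadCount]
  | cons x xs ih => simp only [leadCount]; split <;> omega

theorem leadCount_le_length (w : Int) : ∀ ws : List Int, leadCount w ws ≤ (ws.length : Int) := by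
  intro ws
  induction ws with
  | nil => simp [leadCount]
  | cons x xs ih => simp only [leadCount, List.length_cons]; split <;> push_cast <;> omega

theorem leadCount_anti (w w' : Int) (hw : w ≤ w') :
    ∀ ws : List Int, leadCount w' ws ≤ leadCount w ws := by
  intro ws
  induction ws with
  | nil => simp [leadCount]
  | cons x xs ih =>
    simp only [leadCount]
    split
    · rw [if_pos (by omega)]; omega
    · split
      · have := leadCount_nonneg w xs; omega
      · omega

theorem leadCount_pM : ∀ (ws : List Int) (k : Nat) (low : Int),
    k ≤ ws.length → (k : Int) ≤ leadCount (pM low ws k) ws := by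
  intro ws
  induction ws with
  | nil =>
    intro k low hk
    simp only [List.length_nil, Nat.le_zero] at hk
    subst hk
    simp [leadCount]
  | cons x xs ih =>
    intro k low hk
    cases k with
    | zero => push_cast; exact leadCount_nonneg _ _
    | succ j =>
      simp only [pM, leadCount]
      have hle : pM (min low x) xs j ≤ x :=
        le_trans (pM_le_low xs j (min low x)) (min_le_right _ _)
      rw [if_pos hle]
      have := ih j (min low x) (by simpa using Nat.lt_succ_iff.mp (Nat.lt_of_lt_of_le (Nat.lt_succ_self j) hk))
      push_cast
      omega

theorem pM_ge_of_leadCount : ∀ (ws : List Int) (k : Nat) (low w : Int),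
    (k : Int) ≤ leadCount w ws → w ≤ low → w ≤ pM low ws k := by
  intro ws
  induction ws with
  | nil =>
    intro k low w hk hlow
    cases k <;> simpa [pM] using hlow
  | cons x xs ih =>
    intro k low w hk hlow
    cases k with
    | zero => simpa [pM] using hlow
    | succ j =>
      simp only [leadCount] at hk
      by_cases hx : w ≤ x
      · rw [if_pos hx] at hk
        exact ih j (min low x) w (by push_cast at hk ⊢; omega) (le_min hlow hx)
      · rw [if_neg hx] at hk; omega

-- membership characterizations of the two term lists
theorem mem_termsA : ∀ (ws : List Int) (low line : Int) (i : Nat), i < ws.length →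
    pM low ws (i + 1) * (line + (i : Int)) ∈ termsA ws low line := by
  intro ws
  induction ws with
  | nil => intro _ _ i hi; simp at hi
  | cons x xs ih =>
    intro low line i hi
    cases i with
    | zero => simp [termsA, pM]
    | succ j =>
      have := ih (min low x) (line + 1) j (by simpa using Nat.succ_lt_succ_iff.mp hi)
      simp only [termsA, List.mem_cons]
      right
      simpa [pM, show line + 1 + (j : Int) = line + ((j : Int) + 1) by ring] using this

theorem termsA_mem_inv : ∀ (ws : List Int) (low line t : Int), t ∈ termsA ws low line →
    ∃ i : Nat, i < ws.length ∧ t = pM low ws (i + 1) * (line + (i : Int)) := by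
  intro ws
  induction ws with
  | nil => intro _ _ _ ht; simp [termsA] at ht
  | cons x xs ih =>
    intro low line t ht
    simp only [termsA, List.mem_cons] at ht
    rcases ht with h | h
    · exact ⟨0, by simp, by simpa [pM] using h⟩
    · obtain ⟨j, hj, he⟩ := ih (min low x) (line + 1) t h
      exact ⟨j + 1, by simpa using Nat.succ_lt_succ hj,
        by simpa [pM, show line + ((j : Int) + 1) = line + 1 + (j : Int) by ring] using he⟩

theorem mem_termsB (ws : List Int) : ∀ (fuel : Nat) (w0 w : Int),
    w0 ≤ w → 1 ≤ leadCount w ws → (w - w0).toNat < fuel →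
    w * leadCount w ws ∈ termsB ws fuel w0 := by
  intro fuel
  induction fuel with
  | zero => intro w0 w _ _ hf; omega
  | succ n ih =>
    intro w0 w hw hlc hf
    have h0 : leadCount w0 ws ≠ 0 := by
      have := leadCount_anti w0 w hw ws; omega
    simp only [termsB, if_neg h0, List.mem_cons]
    by_cases he : w = w0
    · left; rw [he]
    · right; exact ih (w0 + 1) w (by omega) hlc (by omega)

theorem termsB_mem_inv (ws : List Int) : ∀ (fuel : Nat) (w0 t : Int), t ∈ termsB ws fuel w0 →
    ∃ w : Int, w0 ≤ w ∧ leadCount w ws ≠ 0 ∧ t = w * leadCount w ws := by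
  intro fuel
  induction fuel with
  | zero => intro w0 t ht; simp [termsB] at ht
  | succ n ih =>
    intro w0 t ht
    simp only [termsB] at ht
    by_cases h0 : leadCount w0 ws = 0
    · simp [h0] at ht
    · rw [if_neg h0] at ht
      rcases List.mem_cons.1 ht with h | h
      · exact ⟨w0, le_refl _, h0, h⟩
      · obtain ⟨w, hw, hlc, he⟩ := ih (w0 + 1) t h
        exact ⟨w, by omega, hlc, he⟩

-- the central identity: A's running-min maximum equals B's width-dual maximum
theorem dual (hd : Int) (tl : List Int) :
    aRun (hd :: tl) hd 1 0 = bLoop (hd :: tl) (hd.toNat + 1) 1 0 := by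
  set ws : List Int := hd :: tl with hws
  rw [aRun_eq_foldl, bLoop_eq_foldl]
  set TA := termsA ws hd 1 with hTA
  set TB := termsB ws (hd.toNat + 1) 1 with hTB
  have hB0 : (0 : Int) ≤ TB.foldl max 0 := foldl_max_init TB 0
  have hA0 : (0 : Int) ≤ TA.foldl max 0 := foldl_max_init TA 0
  apply le_antisymm
  · apply foldl_max_le _ _ _ hB0
    intro t ht
    obtain ⟨i, hi, he⟩ := termsA_mem_inv ws hd 1 t ht
    set m := pM hd ws (i + 1) with hm
    by_cases hmpos : 1 ≤ m
    · have hmhd : m ≤ hd := pM_le_low ws (i + 1) hd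
      have hlc : ((i : Int) + 1) ≤ leadCount m ws := by
        have := leadCount_pM ws (i + 1) hd (by omega)
        push_cast at this; omega
      have hmem : m * leadCount m ws ∈ TB :=
        mem_termsB ws (hd.toNat + 1) 1 m hmpos (by omega) (by omega)
      have hle : t ≤ m * leadCount m ws := by
        rw [he]
        have : (1 : Int) + (i : Int) ≤ leadCount m ws := by omega
        nlinarith [hmpos]
      exact le_trans hle (foldl_max_mem TB 0 _ hmem)
    · have : t ≤ 0 := by
        rw [he]
        have h1 : (0 : Int) < 1 + (i : Int) := by positivity
        have h2 : m ≤ 0 := by omega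
        nlinarith
      exact le_trans this hB0
  · apply foldl_max_le _ _ _ hA0
    intro t ht
    obtain ⟨w, hw, hlc0, he⟩ := termsB_mem_inv ws (hd.toNat + 1) 1 t ht
    set h := leadCount w ws with hh
    have hpos : 1 ≤ h := by have := leadCount_nonneg w ws; omega
    have hlen : h ≤ (ws.length : Int) := leadCount_le_length w ws
    have hwhd : w ≤ hd := by
      have : leadCount w ws = if w ≤ hd then leadCount w tl + 1 else 0 := by
        rw [hws]; rfl
      by_contra hc
      rw [if_neg (by omega)] at this
      omega
    set i : Nat := h.toNat - 1 with hi
    have hi1 : ((i : Nat) : Int) + 1 = h := by omega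
    have hilen : i < ws.length := by omega
    have hpm : w ≤ pM hd ws (i + 1) :=
      pM_ge_of_leadCount ws (i + 1) hd w (by push_cast; omega) hwhd
    have hmem : pM hd ws (i + 1) * (1 + (i : Int)) ∈ TA := mem_termsA ws hd 1 i hilen
    have hle : t ≤ pM hd ws (i + 1) * (1 + (i : Int)) := by
      rw [he]
      have h1i : (1 : Int) + (i : Int) = h := by omega
      rw [h1i]
      nlinarith
    exact le_trans hle (foldl_max_mem TA 0 _ hmem)

-- ===== VERDICT (by name: the statement is the Claim_ definition above) =====
theorem largest_at_position_spec : Claim_equal_largest_at_position := by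
  intro matrix row col _hdom hpre
  obtain ⟨h1, h2⟩ := hpre
  unfold Spec_largest_at_position largest_at_position largest_at_position_alt
  obtain ⟨r0, hr0⟩ : ∃ r0, PySem.List.pyGet? matrix row = some r0 := by
    cases hg : PySem.List.pyGet? matrix row with
    | none =>
      exfalso
      exact (PySem.List.pyGet?_eq_none_iff matrix row |>.mp hg) ⟨h1, h2⟩
    | some r0 => exact ⟨r0, rfl⟩
  rw [hr0]
  dsimp only
  -- the number of rows processed
  set n : Nat := ((matrix.length : Int) - row).toNat with hn
  have hrange : (matrix.length : Int) = row + (n : Int) := by omega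
  have hws : (PySem.List.pyRange row (matrix.length : Int) 1).map (bWidth matrix col)
      = wlist matrix col row n := by
    rw [hrange]; exact map_pyRange_eq_wlist matrix col n row
  rw [aLoop_eq_aRun, hws]
  -- n ≥ 1, so the widths list is a cons with head bWidth matrix col row
  obtain ⟨m, hm⟩ : ∃ m, n = m + 1 := ⟨n - 1, by omega⟩
  rw [hm]
  simp only [wlist]
  have hhead : longest_chain (PySem.List.slice r0 (some col) none) = bWidth matrix col row := by
    rw [longest_chain_eq]; unfold bWidth; rw [hr0]
  rw [hhead]
  exact dual (bWidth matrix col row) (wlist matrix col (row + 1) m)
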